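-- pv_equiv track=rewrite | github.com/wickedkat/first_ERP | crm/crm.py | get_longest_name_id
-- ===== SOURCE A (Python) =====
-- id_index = 0
--
-- name_index = 1
--
-- def get_longest_name_id(table):
--     """
--         Question: What is the id of the customer with the longest name?
--         Args:
--             table(list): data table to work on
--         Returns:
--             string: id of the longest name(if there are more than one, return
--                 the last by alphabetical order of the names)
--         """
--
--     names = [line[name_index] for line in table]
--     length_of_names = []
--     for item in names:
--         n = len(item)
--         length_of_names.append(n)
--     longest = max(length_of_names)
--     list_of_longest = []
--     id_name_dict = {}
--     for line in table:
--         if len(line[name_index]) == longest: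
--             id_name_dict[line[id_index]] = line[name_index]
--     longest_name_reverse_order = max(id_name_dict, key=id_name_dict.get)
--     return longest_name_reverse_order
-- ===== SOURCE B (Python) =====
-- id_index = 0
--
-- name_index = 1
--
--
-- def get_longest_name_id(table):
--     # Single pass: keep the longest name length seen so far and the id->name
--     # dict of the lines attaining it (resetting when a longer name appears),
--     # then return the first id holding the alphabetically largest such name.
--     longest = -1
--     id_name = {}
--     for line in table:
--         n = len(line[name_index])
--         if longest < n:
--             longest = n
--             id_name = {line[id_index]: line[name_index]}
--         elif n == longest:
--             id_name[line[id_index]] = line[name_index]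
--     best = max(id_name.values())
--     for key, name in id_name.items():
--         if name == best:
--             return key
-- ===== Notes on version B (the rewrite author's own statement) =====
-- stated objective: alternative
-- what changed: A's four separate passes (name list, length list, global max, dict of longest lines, max over dict keys by dict.get) are replaced by one online pass that maintains the longest length and the id->name dict of the lines attaining it (reset on a new maximum), followed by a first-match scan of the dict items for the largest value instead of max with a key function.
import Mathlib
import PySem

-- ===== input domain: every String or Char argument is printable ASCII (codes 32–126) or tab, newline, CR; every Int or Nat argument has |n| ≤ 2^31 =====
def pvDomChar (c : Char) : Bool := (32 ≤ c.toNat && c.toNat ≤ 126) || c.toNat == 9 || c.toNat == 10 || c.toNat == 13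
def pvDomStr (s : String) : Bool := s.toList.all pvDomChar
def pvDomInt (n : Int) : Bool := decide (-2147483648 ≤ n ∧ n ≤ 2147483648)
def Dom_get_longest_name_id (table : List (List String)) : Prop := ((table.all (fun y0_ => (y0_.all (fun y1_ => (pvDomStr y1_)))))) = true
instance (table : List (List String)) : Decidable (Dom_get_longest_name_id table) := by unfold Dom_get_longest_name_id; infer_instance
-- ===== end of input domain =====

-- B replaces A's multi-pass pipeline (name list, length list, global max, dict of the
-- longest lines, max over the dict keys by dict.get) by one online pass maintaining
-- (longest length, dict of lines attaining it), then a first-match scan of the items.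

-- ===== PORT A =====
-- pyGetD with default "" is exact here: Pre_ guarantees every line has ≥ 2 fields,
-- so line[0] / line[1] never raise; max(...) of the empty list (ValueError) only
-- happens on the excluded empty table, so .getD after max? is never taken on
-- admitted inputs.
def get_longest_name_id (table : List (List String)) : String :=
  let names := table.map (fun line => PySem.List.pyGetD line 1 "")
  let length_of_names := names.foldl (fun acc item => acc ++ [PySem.Str.len item]) []
  let longest := (PySem.List.max? length_of_names (fun x => x)).getD 0
  -- (A's 'list_of_longest = []' is dead code and has no Lean counterpart)
  let id_name_dict := table.foldl
    (fun d line =>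
      if PySem.Str.len (PySem.List.pyGetD line 1 "") == longest then
        d.insert (PySem.List.pyGetD line 0 "") (PySem.List.pyGetD line 1 "")
      else d)
    PySem.Dict.empty
  -- max(id_name_dict, key=id_name_dict.get): every iterated key is in the dict,
  -- so dict.get k is the stored value; getD "" is exact there.
  (PySem.List.max? id_name_dict.keys (fun k => id_name_dict.getD k "")).getD ""

-- ===== PORT B =====
-- The for-loop with the two accumulators 'longest'/'id_name' is the pair fold; the
-- final for-loop with its early 'return' is find? over the dict items (it always
-- finds a match on admitted inputs: best is one of the values).
def get_longest_name_id_alt (table : List (List String)) : String :=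
  let st := table.foldl
    (fun st line =>
      let n := PySem.Str.len (PySem.List.pyGetD line 1 "")
      if st.1 < n then
        (n, (PySem.Dict.empty).insert (PySem.List.pyGetD line 0 "") (PySem.List.pyGetD line 1 ""))
      else if n == st.1 then
        (st.1, st.2.insert (PySem.List.pyGetD line 0 "") (PySem.List.pyGetD line 1 ""))
      else st)
    ((-1 : Int), PySem.Dict.empty)
  let best := (PySem.List.max? st.2.values (fun v => v)).getD ""
  ((st.2.items.find? (fun kv => kv.2 == best)).map (fun kv => kv.1)).getD ""

-- ===== PRECONDITION & SPEC =====
-- Pre_ excludes exactly the inputs on which A raises: the empty table (ValueError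
-- from max of an empty list) and tables with a line of fewer than 2 fields
-- (IndexError on line[1], or on line[0] for a longest line).
def Pre_get_longest_name_id (table : List (List String)) : Prop :=
  table ≠ [] ∧ (∀ line ∈ table, 2 ≤ line.length)
instance (table : List (List String)) : Decidable (Pre_get_longest_name_id table) := by
  unfold Pre_get_longest_name_id; infer_instance

def pvWitness_get_longest_name_id : List (List String) := [["1", "ann"], ["2", "bo"]]

def Spec_get_longest_name_id (table : List (List String)) (out : String) : Prop := out = get_longest_name_id_alt table
instance (table : List (List String)) (out : String) : Decidable (Spec_get_longest_name_id table out) := by unfold Spec_get_longest_name_id; infer_instance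

-- ===== CLAIM (what is proved, stated in full; the proofs are below) =====
def Claim_equal_get_longest_name_id : Prop := ∀ (table : List (List String)), Dom_get_longest_name_id table → Pre_get_longest_name_id table → Spec_get_longest_name_id table (get_longest_name_id table)

-- ===== LEMMAS AND PROOFS =====

-- One step of Python max(..., key=...): keep the incumbent unless strictly beaten.
def pvStep {α : Type} (lt : α → α → Bool) (acc : Option α) (x : α) : Option α :=
  match acc with
  | none => some x
  | some m => if lt m x then some x else some m

-- "m is the first maximal element of l under the strict comparison lt".
def pvFirstMax {α : Type} (lt : α → α → Bool) (l : List α) (m : α) : Prop :=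
  (∃ pre post, l = pre ++ m :: post ∧ ∀ y ∈ pre, lt y m = true) ∧
    (∀ y ∈ l, lt m y = false)

theorem pvFold_firstMax {α : Type} (lt : α → α → Bool)
    (H1 : ∀ a b c, lt a b = true → lt c b = false → lt a c = true)
    (H2 : ∀ a b c, lt a b = false → lt a c = true → lt b c = true)
    (H3 : ∀ a b c, lt a b = false → lt c a = false → lt c b = false)
    (Hirr : ∀ a, lt a a = false)
    (Hasym : ∀ a b, lt a b = true → lt b a = false) :
    ∀ (xs : List α) (b : α),
      ∃ m, xs.foldl (pvStep lt) (some b) = some m ∧ pvFirstMax lt (b :: xs) m := by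
  intro xs
  induction xs with
  | nil =>
    intro b
    refine ⟨b, rfl, ⟨⟨[], [], rfl, by simp⟩, ?_⟩⟩
    intro y hy
    rcases List.mem_singleton.1 hy with rfl
    exact Hirr y
  | cons x xs ih =>
    intro b
    by_cases h : lt b x = true
    · obtain ⟨m, hf, ⟨⟨pre, post, hdec, hpre⟩, hmax⟩⟩ := ih x
      have hmx : lt m x = false := hmax x (by simp)
      have hbm : lt b m = true := H1 _ _ _ h hmx
      refine ⟨m, ?_, ⟨⟨b :: pre, post, by simp [hdec], ?_⟩, ?_⟩⟩
      · simpa [pvStep, h] using hf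
      · intro y hy
        rcases List.mem_cons.1 hy with rfl | hy
        · exact hbm
        · exact hpre y hy
      · intro y hy
        rcases List.mem_cons.1 hy with rfl | hy
        · exact Hasym _ _ hbm
        · exact hmax y hy
    · have h' : lt b x = false := by simpa using h
      obtain ⟨m, hf, ⟨⟨pre, post, hdec, hpre⟩, hmax⟩⟩ := ih b
      have hfold : (x :: xs).foldl (pvStep lt) (some b) = some m := by
        simpa [pvStep, h'] using hf
      match pre, hdec, hpre with
      | [], hdec, hpre =>
        have hb : b = m := by simpa using congrArg (fun l => l.head?) hdec
        subst hb
        have hxs : xs = post := by simpa using congrArg (fun l => l.tail) hdec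
        refine ⟨b, by simpa using hfold, ⟨⟨[], x :: xs, by simp, by simp⟩, ?_⟩⟩
        intro y hy
        rcases List.mem_cons.1 hy with rfl | hy
        · exact Hirr y
        rcases List.mem_cons.1 hy with rfl | hy
        · exact h'
        · exact hmax y (by simp [hy])
      | p0 :: pre₂, hdec, hpre =>
        have hb : b = p0 := by simpa using congrArg (fun l => l.head?) hdec
        subst hb
        have hxs : xs = pre₂ ++ m :: post := by
          simpa using congrArg (fun l => l.tail) hdec
        have hbmem : b ∈ b :: pre₂ := by simp
        have hbm : lt b m = true := hpre b hbmem
        refine ⟨m, hfold, ⟨⟨b :: x :: pre₂, post, by simp [hxs], ?_⟩, ?_⟩⟩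
        · intro y hy
          rcases List.mem_cons.1 hy with rfl | hy
          · exact hbm
          rcases List.mem_cons.1 hy with rfl | hy
          · exact H2 _ _ _ h' hbm
          · exact hpre y (by simp [hy])
        · intro y hy
          rcases List.mem_cons.1 hy with rfl | hy
          · exact hmax y (by simp)
          rcases List.mem_cons.1 hy with rfl | hy
          · exact H3 _ _ _ h' (hmax b (by simp))
          · exact hmax y (by simp [hxs] at hy ⊢; tauto)

-- max? is the pvStep fold with the linear-order comparison.
theorem pvMax?_eq_fold {α κ : Type} [LinearOrder κ] (xs : List α) (key : α → κ) :
    PySem.List.max? xs key =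
      xs.foldl (pvStep (fun a b => decide (key a < key b))) none := by
  simp only [PySem.List.max?]
  refine PySem.List.foldl_congr_mem (f := fun acc x =>
      match acc with
      | none => some x
      | some m => if key m < key x then some x else some m)
    (g := pvStep (fun a b => decide (key a < key b))) xs none ?_
  intro acc x _
  cases acc with
  | none => rfl
  | some m => by_cases hc : key m < key x <;> simp [pvStep, hc]

theorem pvMax?_firstMax {α κ : Type} [LinearOrder κ] (xs : List α) (key : α → κ)
    (hne : xs ≠ []) :
    ∃ m, PySem.List.max? xs key = some m ∧
      pvFirstMax (fun a b => decide (key a < key b)) xs m := by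
  match xs, hne with
  | x :: xs, _ =>
    rw [pvMax?_eq_fold]
    have hstep : (x :: xs).foldl (pvStep (fun a b => decide (key a < key b))) none =
        xs.foldl (pvStep (fun a b => decide (key a < key b))) (some x) := rfl
    rw [hstep]
    refine pvFold_firstMax _ ?_ ?_ ?_ ?_ ?_ xs x
    · intro a b c h1 h2
      simp only [decide_eq_true_eq, decide_eq_false_iff_not, not_lt] at *
      exact lt_of_lt_of_le h1 h2
    · intro a b c h1 h2
      simp only [decide_eq_true_eq, decide_eq_false_iff_not, not_lt] at *
      exact lt_of_le_of_lt h1 h2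
    · intro a b c h1 h2
      simp only [decide_eq_false_iff_not, not_lt] at *
      exact le_trans h1 h2
    · intro a; simp
    · intro a b h1
      simp only [decide_eq_true_eq, decide_eq_false_iff_not, not_lt] at *
      exact h1.le


-- a fold of pvStep commutes with List.map
theorem pvFoldStep_map {α β : Type} (lt : β → β → Bool) (f : α → β) :
    ∀ (xs : List α) (acc : Option α),
      (xs.map f).foldl (pvStep lt) (acc.map f) =
        (xs.foldl (pvStep (fun a b => lt (f a) (f b))) acc).map f := by
  intro xs
  induction xs with
  | nil => intro acc; rfl
  | cons x xs ih =>
    intro acc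
    cases acc with
    | none => exact ih (some x)
    | some m =>
      simp only [List.map_cons, List.foldl_cons]
      have h1 : pvStep lt (Option.map f (some m)) (f x)
          = Option.map f (pvStep (fun a b => lt (f a) (f b)) (some m) x) := by
        by_cases h : lt (f m) (f x) = true
        · simp [pvStep, h]
        · have h' : lt (f m) (f x) = false := by simpa using h
          simp [pvStep, h']
      rw [h1]
      exact ih (pvStep (fun a b => lt (f a) (f b)) (some m) x)

theorem pvMax?_map {α β κ : Type} [LinearOrder κ] (f : α → β) (key : β → κ) (xs : List α) :
    PySem.List.max? (xs.map f) key = (PySem.List.max? xs (fun x => key (f x))).map f := by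
  rw [pvMax?_eq_fold, pvMax?_eq_fold]
  exact pvFoldStep_map (fun a b => decide (key a < key b)) f xs none

-- max? only looks at the key values of list members
theorem pvFoldStep_congr {α : Type} (lt1 lt2 : α → α → Bool) :
    ∀ (xs : List α) (acc : Option α),
      (∀ x ∈ xs, ∀ y ∈ xs, lt1 x y = lt2 x y) →
      (∀ a, acc = some a → ∀ x ∈ xs, lt1 a x = lt2 a x) →
      xs.foldl (pvStep lt1) acc = xs.foldl (pvStep lt2) acc := by
  intro xs
  induction xs with
  | nil => intro acc _ _; rfl
  | cons x xs ih =>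
    intro acc hall hacc
    simp only [List.foldl_cons]
    have hx : x ∈ x :: xs := by simp
    have hstep : pvStep lt1 acc x = pvStep lt2 acc x := by
      cases acc with
      | none => rfl
      | some m =>
        simp only [pvStep]
        rw [hacc m rfl x hx]
    rw [hstep]
    refine ih (pvStep lt2 acc x) ?_ ?_
    · intro a ha b hb
      exact hall a (by simp [ha]) b (by simp [hb])
    · intro a ha b hb
      cases acc with
      | none =>
        simp only [pvStep] at ha
        injection ha with ha
        subst ha
        exact hall x hx b (by simp [hb])
      | some m =>
        simp only [pvStep] at ha
        by_cases hc : lt2 m x = true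
        · rw [if_pos hc] at ha
          injection ha with ha
          subst ha
          exact hall x hx b (by simp [hb])
        · rw [if_neg hc] at ha
          injection ha with ha
          subst ha
          exact hacc m rfl b (by simp [hb])

theorem pvMax?_congr {α κ : Type} [LinearOrder κ] (k1 k2 : α → κ) (xs : List α)
    (h : ∀ x ∈ xs, k1 x = k2 x) : PySem.List.max? xs k1 = PySem.List.max? xs k2 := by
  rw [pvMax?_eq_fold, pvMax?_eq_fold]
  refine pvFoldStep_congr _ _ xs none ?_ (by intro a ha; cases ha)
  intro a ha b hb
  rw [h a ha, h b hb]

-- first-match lookup in an association list with distinct keys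
theorem pvLookupSelf {κ ν : Type} [BEq κ] [LawfulBEq κ] :
    ∀ (its : List (κ × ν)) (kv : κ × ν), (its.map Prod.fst).Nodup → kv ∈ its →
      its.find? (fun p => p.1 == kv.1) = some kv := by
  intro its
  induction its with
  | nil => intro kv _ h; cases h
  | cons a its ih =>
    intro kv hnd hkv
    simp only [List.map_cons, List.nodup_cons] at hnd
    obtain ⟨hna, hndI⟩ := hnd
    rcases List.mem_cons.1 hkv with rfl | hkv
    · simp
    · have hne : (a.1 == kv.1) = false := by
        refine beq_eq_false_iff_ne.2 ?_
        intro he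
        exact hna (he ▸ List.mem_map_of_mem (f := Prod.fst) hkv)
      rw [List.find?_cons_of_neg (by simp [hne]), ih kv hndI hkv]

theorem pvFindFirst {α : Type} (p : α → Bool) :
    ∀ (pre : List α) (x : α) (post : List α), (∀ y ∈ pre, p y = false) → p x = true →
      (pre ++ x :: post).find? p = some x := by
  intro pre
  induction pre with
  | nil => intro x post _ hx; simp [hx]
  | cons a pre ih =>
    intro x post hpre hx
    rw [List.cons_append, List.find?_cons_of_neg (by simp [hpre a (by simp)]),
      ih x post (fun y hy => hpre y (by simp [hy])) hx]

-- the selection step: max over the keys by lookup = first item holding the largest value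
theorem pvSelect {κ ν : Type} [BEq κ] [LawfulBEq κ] [BEq ν] [LawfulBEq ν] [LinearOrder ν]
    (d : PySem.Dict κ ν) (dv : ν) (dk : κ)
    (hnd : (d.items.map Prod.fst).Nodup) (hne : d.items ≠ []) :
    (PySem.List.max? d.keys (fun k => d.getD k dv)).getD dk
      = ((d.items.find? (fun kv =>
            kv.2 == (PySem.List.max? d.values (fun v => v)).getD dv)).map (fun kv => kv.1)).getD dk := by
  obtain ⟨it, hit, ⟨⟨pre, post, hdec, hpre⟩, hmax⟩⟩ :=
    pvMax?_firstMax d.items (fun kv => kv.2) hne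
  have hlk : ∀ kv ∈ d.items, d.getD kv.1 dv = kv.2 := by
    intro kv hkv
    simp only [PySem.Dict.getD, PySem.Dict.get?, pvLookupSelf d.items kv hnd hkv]
    rfl
  have hkeys : PySem.List.max? d.keys (fun k => d.getD k dv) = some it.1 := by
    have h1 : d.keys = d.items.map Prod.fst := rfl
    rw [h1, pvMax?_map, pvMax?_congr (fun kv => d.getD kv.1 dv) (fun kv => kv.2) d.items hlk,
      hit]
    rfl
  have hvals : (PySem.List.max? d.values (fun v => v)).getD dv = it.2 := by
    have h1 : d.values = d.items.map Prod.snd := rfl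
    rw [h1, pvMax?_map, pvMax?_congr (fun kv => (kv.2 : ν)) (fun kv => kv.2) d.items
      (by intro x _; rfl), hit]
    rfl
  rw [hkeys, hvals, hdec]
  rw [pvFindFirst _ pre it post ?_ (by simp)]
  · rfl
  · intro y hy
    have hlt := hpre y hy
    simp only [decide_eq_true_eq] at hlt
    refine beq_eq_false_iff_ne.2 ?_
    exact ne_of_lt hlt

-- B's online pass computes A's global maximum and A's dict of the longest lines
theorem pvOnline : ∀ (xs : List (List String)),
    xs.foldl
      (fun st line =>
        let n := PySem.Str.len (PySem.List.pyGetD line 1 "")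
        if st.1 < n then
          (n, (PySem.Dict.empty).insert (PySem.List.pyGetD line 0 "") (PySem.List.pyGetD line 1 ""))
        else if n == st.1 then
          (st.1, st.2.insert (PySem.List.pyGetD line 0 "") (PySem.List.pyGetD line 1 ""))
        else st)
      ((-1 : Int), PySem.Dict.empty)
    = ((xs.map (fun l => PySem.Str.len (PySem.List.pyGetD l 1 ""))).foldl max (-1),
       (xs.filter (fun l => PySem.Str.len (PySem.List.pyGetD l 1 "") ==
            (xs.map (fun l => PySem.Str.len (PySem.List.pyGetD l 1 ""))).foldl max (-1))).foldl
         (fun d line => d.insert (PySem.List.pyGetD line 0 "") (PySem.List.pyGetD line 1 ""))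
         PySem.Dict.empty) := by
  intro xs
  induction xs using List.reverseRecOn with
  | nil => rfl
  | append_singleton xs x ih =>
    rw [List.foldl_append, ih]
    have h0 : (0:Int) ≤ PySem.Str.len (PySem.List.pyGetD x 1 "") := by
      simp [PySem.Str.len]
    have hMx : ((xs ++ [x]).map (fun l => PySem.Str.len (PySem.List.pyGetD l 1 ""))).foldl max (-1)
        = max ((xs.map (fun l => PySem.Str.len (PySem.List.pyGetD l 1 ""))).foldl max (-1))
            (PySem.Str.len (PySem.List.pyGetD x 1 "")) := by
      rw [List.map_append, List.foldl_append]
      rfl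
    have hub : ∀ y ∈ xs, PySem.Str.len (PySem.List.pyGetD y 1 "")
        ≤ (xs.map (fun l => PySem.Str.len (PySem.List.pyGetD l 1 ""))).foldl max (-1) := by
      intro y hy
      exact (PySem.List.le_foldl_max _ _).2 _ (List.mem_map_of_mem hy)
    rw [hMx]
    rcases lt_trichotomy ((xs.map (fun l => PySem.Str.len (PySem.List.pyGetD l 1 ""))).foldl max (-1))
        (PySem.Str.len (PySem.List.pyGetD x 1 "")) with hlt | heq | hgt
    · -- strictly longer name: the state resets
      rw [max_eq_right hlt.le]
      have hfil : (xs ++ [x]).filter (fun l => PySem.Str.len (PySem.List.pyGetD l 1 "") ==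
          PySem.Str.len (PySem.List.pyGetD x 1 "")) = [x] := by
        rw [List.filter_append]
        have h1 : xs.filter (fun l => PySem.Str.len (PySem.List.pyGetD l 1 "") ==
            PySem.Str.len (PySem.List.pyGetD x 1 "")) = [] := by
          refine List.filter_eq_nil_iff.2 ?_
          intro y hy
          simp only [beq_iff_eq]
          exact ne_of_lt (lt_of_le_of_lt (hub y hy) hlt)
        rw [h1, List.nil_append, List.filter_cons, if_pos (by simp)]
        rfl
      rw [hfil]
      simp only [List.foldl_cons, List.foldl_nil]
      rw [if_pos hlt]
    · -- equal length: the line joins the dict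
      have hmx : max ((xs.map (fun l => PySem.Str.len (PySem.List.pyGetD l 1 ""))).foldl max (-1))
          (PySem.Str.len (PySem.List.pyGetD x 1 ""))
          = (xs.map (fun l => PySem.Str.len (PySem.List.pyGetD l 1 ""))).foldl max (-1) := by
        rw [heq, max_self]
      have hfil : (xs ++ [x]).filter (fun l => PySem.Str.len (PySem.List.pyGetD l 1 "") ==
            (xs.map (fun l => PySem.Str.len (PySem.List.pyGetD l 1 ""))).foldl max (-1))
          = xs.filter (fun l => PySem.Str.len (PySem.List.pyGetD l 1 "") ==
            (xs.map (fun l => PySem.Str.len (PySem.List.pyGetD l 1 ""))).foldl max (-1)) ++ [x] := by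
        rw [List.filter_append, List.filter_cons, if_pos (by simp only [beq_iff_eq]; exact heq.symm)]
        rfl
      rw [hmx, hfil, List.foldl_append]
      simp only [List.foldl_cons, List.foldl_nil]
      rw [if_neg (by rw [heq]; exact lt_irrefl _), if_pos (by simp only [beq_iff_eq]; exact heq.symm)]
    · -- shorter name: nothing changes
      have hmx : max ((xs.map (fun l => PySem.Str.len (PySem.List.pyGetD l 1 ""))).foldl max (-1))
          (PySem.Str.len (PySem.List.pyGetD x 1 ""))
          = (xs.map (fun l => PySem.Str.len (PySem.List.pyGetD l 1 ""))).foldl max (-1) :=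
        max_eq_left hgt.le
      have hfil : (xs ++ [x]).filter (fun l => PySem.Str.len (PySem.List.pyGetD l 1 "") ==
            (xs.map (fun l => PySem.Str.len (PySem.List.pyGetD l 1 ""))).foldl max (-1))
          = xs.filter (fun l => PySem.Str.len (PySem.List.pyGetD l 1 "") ==
            (xs.map (fun l => PySem.Str.len (PySem.List.pyGetD l 1 ""))).foldl max (-1)) := by
        rw [List.filter_append, List.filter_cons,
          if_neg (by simp only [beq_iff_eq]; exact fun h => absurd h (ne_of_lt hgt))]
        simp
      rw [hmx, hfil]
      simp only [List.foldl_cons, List.foldl_nil]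
      rw [if_neg (not_lt.2 hgt.le), if_neg (by simp only [beq_iff_eq]; exact ne_of_lt hgt)]

-- ===== VERDICT (by name: the statement is the Claim_ definition above) =====
theorem get_longest_name_id_spec : Claim_equal_get_longest_name_id := by
  intro table _ hpre
  obtain ⟨hne, _hlen2⟩ := hpre
  unfold Spec_get_longest_name_id
  -- A's maximal length L
  obtain ⟨L, hL⟩ : ∃ L, PySem.List.max?
      (table.map (fun l => PySem.Str.len (PySem.List.pyGetD l 1 ""))) (fun x => x) = some L := by
    cases hmaxn : PySem.List.max?
        (table.map (fun l => PySem.Str.len (PySem.List.pyGetD l 1 ""))) (fun x => x) with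
    | none => exact absurd ((PySem.List.max?_eq_none_iff _ _).1 hmaxn) (by simpa using hne)
    | some L => exact ⟨L, rfl⟩
  -- B's running maximum is the same L
  have hLfold : (table.map (fun l => PySem.Str.len (PySem.List.pyGetD l 1 ""))).foldl max (-1) = L := by
    match table, hne, hL with
    | t :: ts, _, hL =>
      rw [List.map_cons, PySem.List.max?_id_cons] at hL
      have h0 : (0:Int) ≤ PySem.Str.len (PySem.List.pyGetD t 1 "") := by
        simp [PySem.Str.len]
      rw [List.map_cons, List.foldl_cons, max_eq_right (le_trans (by norm_num) h0)]
      exact Option.some.inj hL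
  -- the common dict of the longest lines
  have hdict := pvOnline table
  rw [hLfold] at hdict
  -- its keys are distinct, and it is nonempty
  have hnodup : (((table.filter (fun l => PySem.Str.len (PySem.List.pyGetD l 1 "") == L)).foldl
      (fun d line => d.insert (PySem.List.pyGetD line 0 "") (PySem.List.pyGetD line 1 ""))
      PySem.Dict.empty).items.map Prod.fst).Nodup := by
    have h := PySem.Dict.nodup_keys_foldl_insert_key
      (table.filter (fun l => PySem.Str.len (PySem.List.pyGetD l 1 "") == L))
      (fun line => PySem.List.pyGetD line 0 "")
      (fun d line => PySem.List.pyGetD line 1 "")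
      PySem.Dict.empty (by simp [PySem.Dict.empty, PySem.Dict.keys])
    exact h
  obtain ⟨w, hw, hwL⟩ := List.mem_map.1 (PySem.List.max?_mem hL)
  have hwK : w ∈ table.filter (fun l => PySem.Str.len (PySem.List.pyGetD l 1 "") == L) :=
    List.mem_filter.2 ⟨hw, by simp only [beq_iff_eq]; exact hwL⟩
  have hitemsne : ((table.filter (fun l => PySem.Str.len (PySem.List.pyGetD l 1 "") == L)).foldl
      (fun d line => d.insert (PySem.List.pyGetD line 0 "") (PySem.List.pyGetD line 1 ""))
      PySem.Dict.empty).items ≠ [] := by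
    intro hnil
    have hkeys := PySem.Dict.keys_foldl_insert_key
      (table.filter (fun l => PySem.Str.len (PySem.List.pyGetD l 1 "") == L))
      (fun line => PySem.List.pyGetD line 0 "")
      (fun d line => PySem.List.pyGetD line 1 "")
      PySem.Dict.empty
    have hmem : PySem.List.pyGetD w 0 "" ∈ (((table.filter
        (fun l => PySem.Str.len (PySem.List.pyGetD l 1 "") == L)).foldl
        (fun d line => d.insert (PySem.List.pyGetD line 0 "") (PySem.List.pyGetD line 1 ""))
        PySem.Dict.empty).keys) := by
      rw [hkeys]
      have : (PySem.Dict.empty (κ := String) (ν := String)).keys = ([] : List String) := rfl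
      rw [this]
      have hupd : PySem.Set.update ([] : List String)
          ((table.filter (fun l => PySem.Str.len (PySem.List.pyGetD l 1 "") == L)).map
            (fun line => PySem.List.pyGetD line 0 ""))
          = PySem.Set.ofList ((table.filter
              (fun l => PySem.Str.len (PySem.List.pyGetD l 1 "") == L)).map
            (fun line => PySem.List.pyGetD line 0 "")) := rfl
      rw [hupd, PySem.Set.mem_ofList]
      exact List.mem_map_of_mem hwK
    rw [show (((table.filter (fun l => PySem.Str.len (PySem.List.pyGetD l 1 "") == L)).foldl
        (fun d line => d.insert (PySem.List.pyGetD line 0 "") (PySem.List.pyGetD line 1 ""))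
        PySem.Dict.empty).keys)
      = (((table.filter (fun l => PySem.Str.len (PySem.List.pyGetD l 1 "") == L)).foldl
        (fun d line => d.insert (PySem.List.pyGetD line 0 "") (PySem.List.pyGetD line 1 ""))
        PySem.Dict.empty).items.map Prod.fst) from rfl, hnil] at hmem
    cases hmem
  -- both sides reduce to the selection over the same dict
  have hsel := pvSelect ((table.filter (fun l => PySem.Str.len (PySem.List.pyGetD l 1 "") == L)).foldl
      (fun d line => d.insert (PySem.List.pyGetD line 0 "") (PySem.List.pyGetD line 1 ""))
      PySem.Dict.empty) "" "" hnodup hitemsne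
  simp only [get_longest_name_id, get_longest_name_id_alt,
    PySem.List.foldl_append_singleton_eq_map, List.nil_append, List.map_map,
    Function.comp_def, hL, Option.getD_some, PySem.List.foldl_if_eq_foldl_filter,
    hdict, hsel]
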